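-- pv_equiv track=rewrite | github.com/joeylmaalouf/advent-of-code | 2021/15/code.py | scale_map
-- ===== SOURCE A (Python) =====
-- def scale_map (risk_map, scale):
-- 	new_map = []
-- 	for y_bonus in range(scale):
-- 		for row in risk_map:
-- 			new_row = []
-- 			for x_bonus in range(scale):
-- 				for value in row:
-- 					new_value = (value + x_bonus + y_bonus) % 9
-- 					if new_value == 0:
-- 						new_value = 9
-- 					new_row.append(new_value)
-- 			new_map.append(new_row)
-- 	return new_map
-- ===== SOURCE B (Python) =====
-- def scale_map(risk_map, scale):
--     # Build the y_bonus=0 band once (each row's first tile normalized, later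
--     # horizontal tiles derived from the previous tile by wraparound increment),
--     # then derive every later band from the previous one by the same increment.
--     def inc(v):
--         return v + 1 if v < 9 else 1
--
--     band = []
--     for row in risk_map:
--         tile = [v % 9 or 9 for v in row]
--         new_row = list(tile)
--         for _ in range(scale - 1):
--             tile = [inc(v) for v in tile]
--             new_row += tile
--         band.append(new_row)
--
--     new_map = []
--     for _ in range(scale):
--         new_map += band
--         band = [[inc(v) for v in r] for r in band]
--     return new_map
-- ===== Notes on version B (the rewrite author's own statement) =====
-- stated objective: alternative
-- what changed: Instead of recomputing every cell from the modular formula (value+x_bonus+y_bonus)%9 in four nested loops, B builds the y_bonus=0 band once and derives each subsequent tile/band from the previous one by an elementwise wraparound increment inc(v)=v+1 if v<9 else 1.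
import Mathlib
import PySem

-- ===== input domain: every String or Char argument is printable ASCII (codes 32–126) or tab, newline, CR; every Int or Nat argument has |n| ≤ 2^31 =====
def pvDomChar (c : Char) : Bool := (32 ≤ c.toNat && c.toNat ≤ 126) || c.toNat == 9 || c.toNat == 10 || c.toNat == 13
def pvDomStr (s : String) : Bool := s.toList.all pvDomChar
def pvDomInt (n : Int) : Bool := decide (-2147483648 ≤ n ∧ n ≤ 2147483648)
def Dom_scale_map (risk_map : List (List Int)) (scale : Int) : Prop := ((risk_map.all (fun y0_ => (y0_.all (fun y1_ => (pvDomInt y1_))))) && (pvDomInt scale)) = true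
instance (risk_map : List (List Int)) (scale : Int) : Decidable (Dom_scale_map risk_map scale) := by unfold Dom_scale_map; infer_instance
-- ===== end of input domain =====

-- B replaces the four-nested-loop modular formula by incremental tiling: build the
-- y_bonus=0 band once, then derive each further tile/band by an elementwise
-- wraparound increment (alternative decomposition, same cost).


-- ===== PORT A =====
def scale_map (risk_map : List (List Int)) (scale : Int) : List (List Int) :=
  (PySem.List.pyRange 0 scale 1).foldl (fun new_map y_bonus =>
    risk_map.foldl (fun new_map row =>
      new_map ++ [(PySem.List.pyRange 0 scale 1).foldl (fun new_row x_bonus =>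
        row.foldl (fun new_row value =>
          let new_value := PySem.Int.mod (value + x_bonus + y_bonus) 9
          new_row ++ [if new_value = 0 then 9 else new_value]) new_row) []]) new_map) []

-- ===== PORT B =====
-- inc(v) from Source B
def pyInc (v : Int) : Int := if v < 9 then v + 1 else 1

def scale_map_alt (risk_map : List (List Int)) (scale : Int) : List (List Int) :=
  let band := risk_map.map (fun row =>
    let tile := row.map (fun v =>
      let m := PySem.Int.mod v 9
      if m = 0 then 9 else m)   -- 'v % 9 or 9'
    ((PySem.List.pyRange 0 (scale - 1) 1).foldl
      (fun (p : List Int × List Int) _ =>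
        (p.1 ++ p.2.map pyInc, p.2.map pyInc)) (tile, tile)).1)
  ((PySem.List.pyRange 0 scale 1).foldl
    (fun (p : List (List Int) × List (List Int)) _ =>
      (p.1 ++ p.2, p.2.map (fun r => r.map pyInc))) ([], band)).1

-- ===== PRECONDITION & SPEC =====
def Spec_scale_map (risk_map : List (List Int)) (scale : Int) (out : List (List Int)) : Prop := out = scale_map_alt risk_map scale
instance (risk_map : List (List Int)) (scale : Int) (out : List (List Int)) : Decidable (Spec_scale_map risk_map scale out) := by unfold Spec_scale_map; infer_instance

-- ===== CLAIM (what is proved, stated in full; the proofs are below) =====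
def Claim_equal_scale_map : Prop := ∀ (risk_map : List (List Int)) (scale : Int), Dom_scale_map risk_map scale → Spec_scale_map risk_map scale (scale_map risk_map scale)

-- ===== LEMMAS AND PROOFS =====

-- The normalized cell value: F t = ((t-1) mod 9) + 1 written as A writes it.
def pvF (t : Int) : Int := if t % 9 = 0 then 9 else t % 9

def pvCell (y x v : Int) : Int := pvF (v + x + y)

-- n successive bands, each obtained from the previous by mapping g, concatenated.
def pvBands {α : Type} (g : α → α) : Nat → List α → List α
  | 0, _ => []
  | n + 1, b => b ++ pvBands g n (b.map g)

lemma pvInc_F (t : Int) : pyInc (pvF t) = pvF (t + 1) := by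
  unfold pyInc pvF
  have h0 : 0 ≤ t % 9 := Int.emod_nonneg t (by norm_num)
  have h1 : t % 9 < 9 := Int.emod_lt_of_pos t (by norm_num)
  have h2 : (t + 1) % 9 = (t % 9 + 1) % 9 := by
    rw [Int.add_emod]; norm_num
  by_cases h : t % 9 = 8
  · have : (t + 1) % 9 = 0 := by rw [h2, h]; decide
    simp [h, this]
  · have h3 : (t + 1) % 9 = t % 9 + 1 := by
      rw [h2]; exact Int.emod_eq_of_lt (by omega) (by omega)
    split_ifs <;> omega

lemma pv_foldl_ignore {α β : Type} (step : β → β) (l : List α) (init : β) :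
    l.foldl (fun p _ => step p) init = step^[l.length] init := by
  induction l generalizing init with
  | nil => rfl
  | cons a l ih => simp [List.foldl_cons, ih, Function.iterate_succ_apply]

lemma pv_iter_out {α : Type} (g : α → α) (n : Nat) : ∀ (acc b : List α),
    ((fun (p : List α × List α) => (p.1 ++ p.2, p.2.map g))^[n] (acc, b)).1
      = acc ++ pvBands g n b := by
  induction n with
  | zero => intro acc b; simp [pvBands]
  | succ n ih =>
      intro acc b
      rw [Function.iterate_succ_apply]
      simpa [pvBands] using ih (acc ++ b) (b.map g)

lemma pv_iter_row {α : Type} (g : α → α) (n : Nat) : ∀ (acc b : List α),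
    ((fun (p : List α × List α) => (p.1 ++ p.2.map g, p.2.map g))^[n] (acc, b)).1
      = acc ++ pvBands g n (b.map g) := by
  induction n with
  | zero => intro acc b; simp [pvBands]
  | succ n ih =>
      intro acc b
      rw [Function.iterate_succ_apply]
      simpa [pvBands] using ih (acc ++ b.map g) (b.map g)

lemma pv_flat_bands {α : Type} (g : α → α) (h : Int → List α)
    (hshift : ∀ y, h (y + 1) = (h y).map g) :
    ∀ (n : Nat) (a : Int), (PySem.List.pyRange a (a + n) 1).flatMap h = pvBands g n (h a) := by
  intro n
  induction n with
  | zero => intro a; rw [PySem.List.pyRange_one_eq_nil (by omega)]; simp [pvBands]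
  | succ n ih =>
      intro a
      rw [PySem.List.pyRange_one_cons (by push_cast; omega)]
      have : a + ((n : Int) + 1) = (a + 1) + n := by ring
      push_cast
      rw [this]
      simp only [List.flatMap_cons, ih (a + 1), hshift a, pvBands]

-- A's closed form: concatenation over y of bands of rows built by the modular formula.
lemma pv_A_closed (risk_map : List (List Int)) (scale : Int) :
    scale_map risk_map scale
      = (PySem.List.pyRange 0 scale 1).flatMap (fun y =>
          risk_map.map (fun row =>
            (PySem.List.pyRange 0 scale 1).flatMap (fun x => row.map (pvCell y x)))) := by
  unfold scale_map
  have hmod : ∀ a : Int, PySem.Int.mod a 9 = a % 9 := fun a =>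
    PySem.Int.mod_eq_emod_of_pos (by norm_num)
  simp only [hmod,
    PySem.List.foldl_append_singleton_eq_map,
    PySem.List.foldl_append_eq_flatMap,
    List.nil_append]
  rfl

lemma pv_B_closed (risk_map : List (List Int)) (scale : Int) :
    scale_map_alt risk_map scale
      = pvBands (fun r => r.map pyInc) (PySem.List.pyRange 0 scale 1).length
          (risk_map.map (fun row =>
            pvBands pyInc ((PySem.List.pyRange 0 (scale - 1) 1).length + 1)
              (row.map (pvCell 0 0)))) := by
  unfold scale_map_alt
  have hmod : ∀ a : Int, PySem.Int.mod a 9 = a % 9 := fun a =>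
    PySem.Int.mod_eq_emod_of_pos (by norm_num)
  have hcell : ∀ v : Int, (if v % 9 = 0 then (9:Int) else v % 9) = pvCell 0 0 v := by
    intro v; simp [pvCell, pvF]
  simp only [hmod, hcell, pv_foldl_ignore, pv_iter_out, pv_iter_row, List.nil_append, pvBands]

lemma pv_row_shift_x (row : List Int) (y x : Int) :
    (row.map (pvCell y x)).map pyInc = row.map (pvCell y (x + 1)) := by
  rw [List.map_map]
  congr 1
  funext v
  show pyInc (pvCell y x v) = pvCell y (x + 1) v
  unfold pvCell
  rw [pvInc_F]
  ring_nf

lemma pv_row_shift_y (row : List Int) (scale y : Int) :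
    ((PySem.List.pyRange 0 scale 1).flatMap (fun x => row.map (pvCell y x))).map pyInc
      = (PySem.List.pyRange 0 scale 1).flatMap (fun x => row.map (pvCell (y + 1) x)) := by
  simp only [List.map_flatMap, List.map_map]
  congr 1
  funext x
  congr 1
  funext v
  show pyInc (pvCell y x v) = pvCell (y + 1) x v
  unfold pvCell
  rw [pvInc_F]
  ring_nf

theorem pv_main (risk_map : List (List Int)) (scale : Int) :
    scale_map risk_map scale = scale_map_alt risk_map scale := by
  by_cases hle : scale ≤ 0
  · -- range(scale) is empty on both sides
    rw [pv_A_closed, pv_B_closed, PySem.List.pyRange_one_eq_nil hle]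
    simp [pvBands]
  · have hpos : 0 < scale := by omega
    have hn : scale = ((scale.toNat : Nat) : Int) := (Int.toNat_of_nonneg hpos.le).symm
    obtain ⟨n, hscale, hn1⟩ : ∃ n : Nat, scale = (n : Int) ∧ 1 ≤ n :=
      ⟨scale.toNat, hn, by omega⟩
    subst hscale
    rw [pv_A_closed, pv_B_closed]
    -- collapse B's counters
    rw [PySem.List.length_pyRange_one, PySem.List.length_pyRange_one]
    have hcnt : ((n : Int) - 1 - 0).toNat + 1 = n := by omega
    have hcnt2 : ((n : Int) - 0).toNat = n := by omega
    rw [hcnt, hcnt2]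
    -- outer loop: bands over y
    have houter := pv_flat_bands (fun r : List Int => r.map pyInc)
      (fun y => risk_map.map (fun row =>
        (PySem.List.pyRange 0 (n : Int) 1).flatMap (fun x => row.map (pvCell y x))))
      (by
        intro y
        rw [List.map_map]
        apply List.map_congr_left
        intro row _
        exact (pv_row_shift_y row (n : Int) y).symm) n 0
    rw [zero_add] at houter
    rw [houter]
    congr 1
    apply List.map_congr_left
    intro row _
    -- inner loop: tiles over x
    have hinner := pv_flat_bands pyInc (fun x => row.map (pvCell 0 x))
      (fun x => (pv_row_shift_x row 0 x).symm) n 0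
    rw [zero_add] at hinner
    rw [hinner]

-- ===== VERDICT (by name: the statement is the Claim_ definition above) =====
theorem scale_map_spec : Claim_equal_scale_map := by
  intro risk_map scale _
  unfold Spec_scale_map
  exact pv_main risk_map scale
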